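-- pv_equiv track=rewrite | github.com/nicksmadscience/adhd-lifehacks | helpers.py | streakFinder
-- ===== SOURCE A (Python) =====
-- def streakFinder(event, recurringLogged):
--
--     streak = 0
--     broken = False
--     for log in reversed(recurringLogged):
--         # print (log)
--         if log[0] == event:
--             if log[2] == "met" and broken == False:
--                 streak += 1
--             elif log[2] == "missed":
--                 broken = True
--
--     return streak
-- ===== SOURCE B (Python) =====
-- def streakFinder(event, recurringLogged):
--     filtered = [log for log in recurringLogged if log[0] == event]
--     cutoff = 0
--     for i, log in enumerate(filtered):
--         if log[2] == "missed":
--             cutoff = i + 1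
--     return sum(1 for log in filtered[cutoff:] if log[2] == "met")
-- ===== Notes on version B (the rewrite author's own statement) =====
-- stated objective: alternative
-- what changed: Replaces A's single reverse pass with a mutable broken flag by forward passes: filter the event's entries, compute the index just past the last 'missed', then count 'met' entries in the remaining suffix.
import Mathlib
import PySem

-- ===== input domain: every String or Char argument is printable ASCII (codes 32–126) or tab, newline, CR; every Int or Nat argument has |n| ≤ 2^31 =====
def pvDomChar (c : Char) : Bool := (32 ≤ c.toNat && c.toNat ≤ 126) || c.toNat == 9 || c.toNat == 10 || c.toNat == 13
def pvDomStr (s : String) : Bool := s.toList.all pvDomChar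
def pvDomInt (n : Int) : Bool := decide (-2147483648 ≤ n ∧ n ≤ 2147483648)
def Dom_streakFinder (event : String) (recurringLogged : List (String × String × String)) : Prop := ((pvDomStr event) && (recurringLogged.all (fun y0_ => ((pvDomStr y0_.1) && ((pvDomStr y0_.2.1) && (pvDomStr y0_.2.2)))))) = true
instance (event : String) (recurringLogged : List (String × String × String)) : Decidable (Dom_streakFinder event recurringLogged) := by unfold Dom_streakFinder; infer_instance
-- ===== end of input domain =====

-- B replaces A's single reverse pass with a broken flag by forward passes (filter, cutoff after last 'missed', count 'met' in the suffix); objective: alternative decomposition, same cost.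

-- ===== PORT A =====
-- literal transliteration of A: reverse loop with state (streak, broken)
def streakFinder (event : String) (recurringLogged : List (String × String × String)) : Int :=
  (recurringLogged.reverse.foldl
    (fun (st : Int × Bool) log =>
      if log.1 == event then
        if log.2.2 == "met" && !st.2 then (st.1 + 1, st.2)
        else if log.2.2 == "missed" then (st.1, true)
        else st
      else st) (0, false)).1

-- ===== PORT B =====
-- the enumerate loop of Source B computing the index just past the last "missed"
def pvCutoff : List (String × String × String) → Nat → Nat → Nat
  | [], _, c => c
  | log :: t, i, c => pvCutoff t (i + 1) (if log.2.2 == "missed" then i + 1 else c)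

def streakFinder_alt (event : String) (recurringLogged : List (String × String × String)) : Int :=
  let filtered := recurringLogged.filter (fun log => log.1 == event)
  let cutoff := pvCutoff filtered 0 0
  (((filtered.drop cutoff).filter (fun log => log.2.2 == "met")).length : Int)

-- ===== PRECONDITION & SPEC =====
def Spec_streakFinder (event : String) (recurringLogged : List (String × String × String)) (out : Int) : Prop := out = streakFinder_alt event recurringLogged
instance (event : String) (recurringLogged : List (String × String × String)) (out : Int) : Decidable (Spec_streakFinder event recurringLogged out) := by unfold Spec_streakFinder; infer_instance

-- ===== CLAIM (what is proved, stated in full; the proofs are below) =====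
def Claim_equal_streakFinder : Prop := ∀ (event : String) (recurringLogged : List (String × String × String)), Dom_streakFinder event recurringLogged → Spec_streakFinder event recurringLogged (streakFinder event recurringLogged)

-- ===== LEMMAS AND PROOFS =====

def pvMissed (log : String × String × String) : Bool := log.2.2 == "missed"
def pvMet (log : String × String × String) : Bool := log.2.2 == "met"

-- A's loop body once the event check has passed
def pvStep (log : String × String × String) (st : Int × Bool) : Int × Bool :=
  if pvMet log && !st.2 then (st.1 + 1, st.2)
  else if pvMissed log then (st.1, true)
  else st

-- index (within the list, +1) of the last missed entry; meaningful only when one exists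
def pvR : List (String × String × String) → Nat
  | [] => 0
  | x :: t => if t.any pvMissed then pvR t + 1 else if pvMissed x then 1 else 0

theorem pvCutoff_eq (f : List (String × String × String)) :
    ∀ i c, pvCutoff f i c = if f.any pvMissed then i + pvR f else c := by
  induction f with
  | nil => intro i c; simp [pvCutoff]
  | cons x t ih =>
    intro i c
    simp only [pvCutoff, ih, List.any_cons, pvR, pvMissed]
    by_cases hx : (x.2.2 == "missed") = true <;>
      by_cases ht : t.any pvMissed = true <;>
      simp [hx, ht] <;> omega

-- B's value on an already-filtered list
def pvBc (f : List (String × String × String)) : Int :=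
  (((f.drop (if f.any pvMissed then pvR f else 0)).filter pvMet).length : Int)

theorem pvMet_not_missed (x : String × String × String) (h : pvMet x = true) :
    pvMissed x = false := by
  simp [pvMet] at h
  simp [pvMissed, h]

theorem pvFoldr_eq (f : List (String × String × String)) :
    f.foldr pvStep (0, false) = (pvBc f, f.any pvMissed) := by
  induction f with
  | nil => simp [pvBc]
  | cons x t ih =>
    simp only [List.foldr_cons, ih, pvStep, List.any_cons]
    by_cases hm : pvMet x = true
    · have hx := pvMet_not_missed x hm
      by_cases ht : t.any pvMissed = true
      · simp [hm, hx, ht, pvBc, pvR, List.drop_succ_cons]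
      · have hm' : x.2.2 = "met" := by simpa [pvMet] using hm
        simp [hm', hx, ht, pvBc, pvMet]
    · by_cases hx : pvMissed x = true
      · by_cases ht : t.any pvMissed = true
        · simp [hm, hx, ht, pvBc, pvR, List.drop_succ_cons]
        · simp [hm, hx, ht, pvBc, pvR, List.drop_succ_cons]
      · by_cases ht : t.any pvMissed = true
        · simp [hm, hx, ht, pvBc, pvR, List.drop_succ_cons]
        · simp [hx, ht, pvBc, hm]

theorem pvFoldr_filter (event : String) (l : List (String × String × String)) (st : Int × Bool) :
    l.foldr (fun log s => if log.1 == event then pvStep log s else s) st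
      = (l.filter (fun log => log.1 == event)).foldr pvStep st := by
  induction l with
  | nil => rfl
  | cons x t ih =>
    simp only [List.foldr_cons, List.filter_cons]
    by_cases h : (x.1 == event) = true
    · rw [if_pos h, if_pos h, List.foldr_cons, ih]
    · rw [if_neg h, if_neg h, ih]

-- ===== VERDICT (by name: the statement is the Claim_ definition above) =====
theorem streakFinder_spec : Claim_equal_streakFinder := by
  intro event rl _
  unfold Spec_streakFinder streakFinder streakFinder_alt
  rw [List.foldl_reverse]
  have h1 : (rl.foldr
      (fun x y => if x.1 == event then
        if x.2.2 == "met" && !y.2 then (y.1 + 1, y.2)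
        else if x.2.2 == "missed" then (y.1, true)
        else y
      else y) ((0 : Int), false))
      = (rl.filter (fun log => log.1 == event)).foldr pvStep ((0 : Int), false) := by
    rw [← pvFoldr_filter]
    rfl
  rw [h1, pvFoldr_eq]
  simp [pvBc, pvCutoff_eq, pvMissed]
  rfl
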